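-- pv_equiv track=rewrite | github.com/zhoutianzi666/PaddleNLP | paddlenlp/mergekit/merge_utils.py | divide_positions
-- ===== SOURCE A (Python) =====
-- def divide_positions(m, n):
--     if n == 0:
--         raise ValueError("n should be greater than zero")
--     if m < n:
--         raise ValueError("tensor number should be greater than or equal to processor number")
--     base_value = m // n
--     remainder = m % n
--     positions = [0]
--     for i in range(1, n):
--         if remainder > 0:
--             positions.append(positions[-1] + base_value + 1)
--             remainder -= 1
--         else:
--             positions.append(positions[-1] + base_value)
--     positions.append(m)
--     return positions
-- ===== SOURCE B (Python) =====
-- def divide_positions(m, n):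
--     if n == 0:
--         raise ValueError("n should be greater than zero")
--     if m < n:
--         raise ValueError("tensor number should be greater than or equal to processor number")
--     base = m // n
--     remainder = m % n
--     return [0] + [i * base + min(i, remainder) for i in range(1, n)] + [m]
-- ===== Notes on version B (the rewrite author's own statement) =====
-- stated objective: simpler
-- what changed: Replaces A's cumulative loop threading a running total and a mutable remainder counter (positions.append(positions[-1]+base(+1))) with a direct closed-form comprehension i*base + min(i, remainder) computing each boundary independently from its index.
import Mathlib
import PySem

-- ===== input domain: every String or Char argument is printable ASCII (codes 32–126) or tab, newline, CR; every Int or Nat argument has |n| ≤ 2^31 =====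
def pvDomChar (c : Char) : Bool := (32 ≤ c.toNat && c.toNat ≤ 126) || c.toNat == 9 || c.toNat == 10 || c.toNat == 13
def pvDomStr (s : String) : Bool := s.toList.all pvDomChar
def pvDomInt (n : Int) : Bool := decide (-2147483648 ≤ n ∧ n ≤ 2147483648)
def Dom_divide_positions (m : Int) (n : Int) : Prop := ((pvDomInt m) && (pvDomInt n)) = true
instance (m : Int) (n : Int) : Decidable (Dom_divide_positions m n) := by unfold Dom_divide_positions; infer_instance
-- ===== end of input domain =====

-- B replaces A's running-total loop (positions.append(positions[-1] + …)) by an index-local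
-- closed form i*base + min(i, remainder) for each interior boundary: simpler, no threaded state.


-- ===== PORT A =====
-- positions[-1] is ported as pyGetD … (-1) 0: the list always contains at least [0], so the
-- index is in range and the default is never used (exact).
def divide_positions (m : Int) (n : Int) : List Int :=
  let base_value := PySem.Int.floordiv m n
  let remainder := PySem.Int.mod m n
  let st := (PySem.List.pyRange 1 n 1).foldl
    (fun (st : List Int × Int) _i =>
      if st.2 > 0 then
        (st.1 ++ [PySem.List.pyGetD st.1 (-1) 0 + base_value + 1], st.2 - 1)
      else
        (st.1 ++ [PySem.List.pyGetD st.1 (-1) 0 + base_value], st.2))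
    ([0], remainder)
  st.1 ++ [m]

-- ===== PORT B =====
def divide_positions_alt (m : Int) (n : Int) : List Int :=
  let base := PySem.Int.floordiv m n
  let remainder := PySem.Int.mod m n
  [0] ++ (PySem.List.pyRange 1 n 1).map (fun i => i * base + min i remainder) ++ [m]

-- ===== PRECONDITION & SPEC =====
-- A raises ValueError when n == 0 or m < n; exactly those inputs are excluded.
def Pre_divide_positions (m : Int) (n : Int) : Prop := n ≠ 0 ∧ n ≤ m
instance (m : Int) (n : Int) : Decidable (Pre_divide_positions m n) := by
  unfold Pre_divide_positions; infer_instance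
def pvWitness_divide_positions : Int × Int := (10, 3)

def Spec_divide_positions (m : Int) (n : Int) (out : List Int) : Prop := out = divide_positions_alt m n
instance (m : Int) (n : Int) (out : List Int) : Decidable (Spec_divide_positions m n out) := by
  unfold Spec_divide_positions; infer_instance

-- ===== CLAIM (what is proved, stated in full; the proofs are below) =====
def Claim_equal_divide_positions : Prop := ∀ (m : Int) (n : Int), Dom_divide_positions m n → Pre_divide_positions m n → Spec_divide_positions m n (divide_positions m n)

-- ===== LEMMAS AND PROOFS =====

-- A's loop body ignores the loop index: the fold is an iterate of the step function.
theorem pv_foldl_ignore {α β : Type} (g : β → β) :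
    ∀ (l : List α) (s : β), l.foldl (fun st _ => g st) s = g^[l.length] s := by
  intro l
  induction l with
  | nil => intro s; rfl
  | cons x xs ih =>
      intro s
      simp only [List.foldl_cons, List.length_cons, ih, Function.iterate_succ_apply]

-- the last element of the partially built positions list
theorem pv_last_pos (base r : Int) (hr : 0 ≤ r) (t : Nat) :
    PySem.List.pyGetD
      ([0] ++ (List.range t).map (fun (k : Nat) => ((k : Int) + 1) * base + min ((k : Int) + 1) r)) (-1) 0
      = (t : Int) * base + min (t : Int) r := by
  cases t with
  | zero =>
      have h : PySem.List.pyGetD ([0] : List Int) (-1) 0 = 0 := by decide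
      simp only [List.range_zero, List.map_nil, List.append_nil, h]
      simp
      omega
  | succ s =>
      rw [List.range_succ, List.map_append, ← List.append_assoc]
      simp only [List.map_cons, List.map_nil]
      rw [PySem.List.pyGetD_neg_one_append_singleton]
      push_cast
      ring_nf

-- loop invariant: after t iterations the state is the closed-form prefix plus the remaining remainder
theorem pv_loop_invariant (base r : Int) (hr : 0 ≤ r) (t : Nat) :
    (fun (st : List Int × Int) =>
      if st.2 > 0 then
        (st.1 ++ [PySem.List.pyGetD st.1 (-1) 0 + base + 1], st.2 - 1)
      else
        (st.1 ++ [PySem.List.pyGetD st.1 (-1) 0 + base], st.2))^[t] ([0], r)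
    = ([0] ++ (List.range t).map (fun (k : Nat) => ((k : Int) + 1) * base + min ((k : Int) + 1) r),
       r - min (t : Int) r) := by
  induction t with
  | zero => simp; omega
  | succ s ih =>
      rw [Function.iterate_succ_apply', ih]
      rw [pv_last_pos base r hr s]
      by_cases h : r - min (s : Int) r > 0
      · have hs : min (s : Int) r = s := by omega
        have hs1 : min ((s : Int) + 1) r = (s : Int) + 1 := by omega
        simp only [h, if_pos]
        rw [List.range_succ, List.map_append, ← List.append_assoc]
        simp only [List.map_cons, List.map_nil, Prod.mk.injEq]
        refine ⟨?_, ?_⟩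
        · simp; rw [hs, hs1]; ring
        · push_cast; omega
      · have hs : min (s : Int) r = r := by omega
        have hs1 : min ((s : Int) + 1) r = r := by omega
        simp only [h, if_neg, not_false_iff]
        rw [List.range_succ, List.map_append, ← List.append_assoc]
        simp only [List.map_cons, List.map_nil, Prod.mk.injEq]
        refine ⟨?_, ?_⟩
        · simp; rw [hs, hs1]; ring
        · push_cast; omega

-- ===== VERDICT (by name: the statement is the Claim_ definition above) =====
theorem divide_positions_spec : Claim_equal_divide_positions := by
  intro m n _hdom hpre
  obtain ⟨hn0, hnm⟩ := hpre
  unfold Spec_divide_positions divide_positions divide_positions_alt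
  simp only
  rw [PySem.List.pyRange_one 1 n]
  rcases lt_or_gt_of_ne hn0 with hneg | hpos
  · -- n < 0: the loop range is empty on both sides; both results are [0, m]
    have : (n - 1).toNat = 0 := by omega
    rw [this]
    simp
  · -- n > 0: remainder ≥ 0, use the loop invariant
    have hr : 0 ≤ PySem.Int.mod m n := PySem.Int.mod_nonneg m hpos
    set base := PySem.Int.floordiv m n with hb
    set r := PySem.Int.mod m n with hrdef
    rw [pv_foldl_ignore, List.length_map, List.length_range,
      pv_loop_invariant base r hr ((n - 1).toNat)]
    simp only [List.map_map]
    congr 1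
    congr 1
    apply List.map_congr_left
    intro k _
    simp only [Function.comp]
    ring_nf
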